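-- pv_equiv track=rewrite | github.com/jennifer19/Movie-Recommender-System-in-Spark | SourceCode/RecommenderSystem.py | map1
-- ===== SOURCE A (Python) =====
-- def map1(ratings):
--     actual = []
--     preds = []
--     for i in range(int(len(ratings)/2)):
--         actual.append(ratings[2*i])
--         preds.append(ratings[(2*i)+1])
--
--     actual_indices = list(range(len(actual)))
--     actual_indices.sort(key=lambda x: actual[x], reverse = True)
--     actual_output = [0] * len(actual_indices)
--     for i, x in enumerate(actual_indices):
--         actual_output[x] = i + 1
--
--     preds_indices = list(range(len(preds)))
--     preds_indices.sort(key=lambda x: preds[x], reverse = True)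
--     preds_output = [0] * len(preds_indices)
--     for i, x in enumerate(preds_indices):
--         preds_output[x] = i + 1
--
--     return (preds_output[:10], actual_output[:10]) #compare only the first 10 predictions and ground truths
-- ===== SOURCE B (Python) =====
-- def map1(ratings):
--     n = len(ratings) // 2
--     actual = [ratings[2 * i] for i in range(n)]
--     preds = [ratings[2 * i + 1] for i in range(n)]
--
--     def ranks(vals):
--         # rank of position j (1-based, descending, stable) =
--         # 1 + (# strictly greater values) + (# equal values at earlier positions)
--         out = []
--         for j in range(min(10, len(vals))):
--             vj = vals[j]
--             greater = sum(1 for v in vals if v > vj)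
--             earlier_eq = vals[:j].count(vj)
--             out.append(1 + greater + earlier_eq)
--         return out
--
--     return (ranks(preds), ranks(actual))
-- ===== Notes on version B (the rewrite author's own statement) =====
-- stated objective: alternative
-- what changed: Replaces the two index sorts plus scatter-assignment by a direct rank computation: for each of the at most 10 needed positions the rank is 1 + (count of strictly greater values) + (count of equal values at earlier positions), so no sorting and no output array are needed.
import Mathlib
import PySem

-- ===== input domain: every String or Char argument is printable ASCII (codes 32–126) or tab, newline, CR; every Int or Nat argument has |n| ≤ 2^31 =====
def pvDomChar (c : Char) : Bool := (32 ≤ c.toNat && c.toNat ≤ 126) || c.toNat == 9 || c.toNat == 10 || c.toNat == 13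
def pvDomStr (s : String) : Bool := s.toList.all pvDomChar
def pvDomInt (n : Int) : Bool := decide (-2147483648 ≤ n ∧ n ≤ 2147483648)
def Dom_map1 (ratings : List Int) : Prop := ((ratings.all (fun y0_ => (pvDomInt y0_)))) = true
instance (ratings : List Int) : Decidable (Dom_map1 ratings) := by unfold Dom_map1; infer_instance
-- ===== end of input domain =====

-- B replaces A's two stable index sorts + scatter-assignment by directly computing, for each of the
-- at most 10 needed positions, rank = 1 + (# strictly greater values) + (# equal values earlier):
-- a genuinely different algorithm of similar cost (objective: alternative).

-- ===== PORT A =====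
-- Python list assignment out[i] = v; exact for -len(out) <= i < len(out) (Python raises on other
-- indices; this program only ever assigns at indices 0 <= i < len(out), proved in scatter_get below).
def pySetItem (xs : List Int) (i v : Int) : List Int :=
  if 0 ≤ i then xs.set i.toNat v else xs.set ((xs.length : Int) + i).toNat v

-- A's repeated block: out = [0]*len(idxs); for i, x in enumerate(idxs): out[x] = i + 1
def rankOutput (idxs : List Int) : List Int :=
  (PySem.List.enumerate idxs 0).foldl (fun out p => pySetItem out p.2 (p.1 + 1))
    (PySem.List.pyRepeat [0] (PySem.List.len idxs))

-- the list subscripts ratings[2*i], ratings[2*i+1] and the sort key actual[x]/preds[x] are always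
-- in range (0 <= i < len//2, x drawn from range(len)), so they are ported as pyGetD; int(len(r)/2)
-- equals len(r) // 2 exactly (the float is exact for any real list length), ported as floordiv.
def map1 (ratings : List Int) : List Int × List Int :=
  let ap := (PySem.List.pyRange 0 (PySem.Int.floordiv (PySem.List.len ratings) 2) 1).foldl
      (fun s i => (s.1 ++ [PySem.List.pyGetD ratings (2*i) 0],
                   s.2 ++ [PySem.List.pyGetD ratings (2*i+1) 0])) ([], [])
  let actual := ap.1
  let preds := ap.2
  let actualIndices := PySem.List.sorted (PySem.List.pyRange 0 (PySem.List.len actual) 1)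
      (fun x => PySem.List.pyGetD actual x 0) true
  let actualOutput := rankOutput actualIndices
  let predsIndices := PySem.List.sorted (PySem.List.pyRange 0 (PySem.List.len preds) 1)
      (fun x => PySem.List.pyGetD preds x 0) true
  let predsOutput := rankOutput predsIndices
  (PySem.List.slice predsOutput none (some 10), PySem.List.slice actualOutput none (some 10))

-- ===== PORT B =====
-- B's helper ranks(vals): for each j < min(10, len(vals)),
--   1 + sum(1 for v in vals if v > vj) + vals[:j].count(vj)
def ranksAlt (vals : List Int) : List Int :=
  (PySem.List.pyRange 0 (min 10 (PySem.List.len vals)) 1).map (fun j =>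
    let vj := PySem.List.pyGetD vals j 0
    1 + (vals.countP (fun v => v > vj) : Int) + ((PySem.List.slice vals none (some j)).count vj : Int))

def map1_alt (ratings : List Int) : List Int × List Int :=
  let n := PySem.Int.floordiv (PySem.List.len ratings) 2
  let actual := (PySem.List.pyRange 0 n 1).map (fun i => PySem.List.pyGetD ratings (2*i) 0)
  let preds := (PySem.List.pyRange 0 n 1).map (fun i => PySem.List.pyGetD ratings (2*i+1) 0)
  (ranksAlt preds, ranksAlt actual)

-- ===== PRECONDITION & SPEC =====
def Spec_map1 (ratings : List Int) (out : List Int × List Int) : Prop := out = map1_alt ratings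
instance (ratings : List Int) (out : List Int × List Int) : Decidable (Spec_map1 ratings out) := by unfold Spec_map1; infer_instance

-- ===== CLAIM (what is proved, stated in full; the proofs are below) =====
def Claim_equal_map1 : Prop := ∀ (ratings : List Int), Dom_map1 ratings → Spec_map1 ratings (map1 ratings)

-- ===== LEMMAS AND PROOFS =====
-- strict lexicographic 'comes before' order of the descending stable sort: larger key first, ties by index
def lexlt (key : Int → Int) (a b : Int) : Bool := key b < key a || (key a == key b && a < b)

lemma insertBy_pairwise_lex (key : Int → Int) (x : Int) (acc : List Int)
    (hp : acc.Pairwise (fun a b => lexlt key a b = true)) (hlt : ∀ b ∈ acc, b < x) :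
    (PySem.List.insertBy (fun a b => decide (key b < key a)) x acc).Pairwise
      (fun a b => lexlt key a b = true) := by
  induction acc with
  | nil => simp [PySem.List.insertBy]
  | cons y t ih =>
    rw [List.pairwise_cons] at hp
    simp only [PySem.List.insertBy]
    by_cases h : key y < key x
    · simp only [h, decide_true, if_true]
      refine List.Pairwise.cons ?_ (List.Pairwise.cons hp.1 hp.2)
      intro z hz
      rcases List.mem_cons.mp hz with rfl | hz
      · simp [lexlt]; omega
      · have := hp.1 z hz
        simp [lexlt] at this ⊢; omega
    · simp only [h, decide_false]
      refine List.Pairwise.cons ?_ (ih hp.2 (fun b hb => hlt b (List.mem_cons_of_mem _ hb)))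
      intro z hz
      rcases (PySem.List.mem_insertBy _ _ _ _).mp hz with rfl | hz
      · have hy := hlt y (List.mem_cons_self)
        simp [lexlt]; omega
      · exact hp.1 z hz

lemma foldl_ins_pairwise (key : Int → Int) : ∀ (xs acc : List Int),
    xs.Pairwise (· < ·) → acc.Pairwise (fun a b => lexlt key a b = true) →
    (∀ b ∈ acc, ∀ x ∈ xs, b < x) →
    (xs.foldl (fun acc x => PySem.List.insertBy (fun a b => decide (key b < key a)) x acc)
      acc).Pairwise (fun a b => lexlt key a b = true) := by
  intro xs
  induction xs with
  | nil => intro acc _ hacc _; simpa using hacc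
  | cons x t ih =>
    intro acc hxs hacc hcross
    rw [List.pairwise_cons] at hxs
    simp only [List.foldl_cons]
    refine ih _ hxs.2 (insertBy_pairwise_lex key x acc hacc
      (fun b hb => hcross b hb x List.mem_cons_self)) ?_
    intro b hb x' hx'
    rcases (PySem.List.mem_insertBy _ _ _ _).mp hb with rfl | hb
    · exact hxs.1 x' hx'
    · exact hcross b hb x' (List.mem_cons_of_mem _ hx')

lemma sorted_pyRange_pairwise_lex (key : Int → Int) (n : Int) :
    (PySem.List.sorted (PySem.List.pyRange 0 n 1) key true).Pairwise
      (fun a b => lexlt key a b = true) := by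
  rw [PySem.List.sorted_rev_eq_foldl_insertBy]
  exact foldl_ins_pairwise key _ [] (PySem.List.pairwise_lt_pyRange_one 0 n)
    (by simp) (by simp)

lemma idxOf_eq_countP_lexlt (key : Int → Int) (j : Int) : ∀ (ys : List Int),
    ys.Pairwise (fun a b => lexlt key a b = true) → j ∈ ys →
    ys.idxOf j = ys.countP (fun k => lexlt key k j) := by
  intro ys
  induction ys with
  | nil => simp
  | cons y t ih =>
    intro hp hj
    rw [List.pairwise_cons] at hp
    by_cases h : y = j
    · subst h
      rw [List.idxOf_cons_self]
      rw [List.countP_cons]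
      have h1 : lexlt key y y = false := by simp [lexlt]
      rw [List.countP_eq_zero.mpr, h1]
      · simp
      · intro k hk
        have := hp.1 k hk
        simp [lexlt] at this ⊢; omega
    · have hjt : j ∈ t := by rcases List.mem_cons.mp hj with rfl | h2; exact absurd rfl h; exact h2
      rw [List.idxOf_cons_ne _ (by exact fun hh => h hh), List.countP_cons]
      have : lexlt key y j = true := hp.1 j hjt
      rw [this, ih hp.2 hjt]
      simp

lemma pySetItem_length (xs : List Int) (i v : Int) : (pySetItem xs i v).length = xs.length := by
  unfold pySetItem; split <;> simp

lemma scatter_length : ∀ (ys : List Int) (s : Int) (out : List Int),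
    ((PySem.List.enumerate ys s).foldl (fun o p => pySetItem o p.2 (p.1 + 1)) out).length
      = out.length := by
  intro ys
  induction ys with
  | nil => intro s out; simp [PySem.List.enumerate_nil]
  | cons y t ih =>
    intro s out
    rw [PySem.List.enumerate_cons, List.foldl_cons, ih, pySetItem_length]

lemma scatter_get : ∀ (ys : List Int) (s : Int) (out : List Int), ys.Nodup →
    (∀ x ∈ ys, 0 ≤ x ∧ x.toNat < out.length) → ∀ (j : Nat),
    ((PySem.List.enumerate ys s).foldl (fun o p => pySetItem o p.2 (p.1 + 1)) out)[j]?
      = if (j : Int) ∈ ys then some (s + (ys.idxOf (j : Int) : Int) + 1) else out[j]? := by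
  intro ys
  induction ys with
  | nil => intro s out _ _ j; simp [PySem.List.enumerate_nil]
  | cons y t ih =>
    intro s out hnd hrange j
    rw [List.nodup_cons] at hnd
    have hy := hrange y List.mem_cons_self
    have hout' : (pySetItem out y (s + 1)).length = out.length := pySetItem_length _ _ _
    rw [PySem.List.enumerate_cons, List.foldl_cons,
      ih (s + 1) _ hnd.2 (fun x hx => by
        rw [hout']; exact hrange x (List.mem_cons_of_mem _ hx)) j]
    by_cases hjt : (j : Int) ∈ t
    · have hjy : (j : Int) ≠ y := fun h => hnd.1 (h ▸ hjt)
      rw [if_pos hjt, if_pos (List.mem_cons_of_mem _ hjt),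
        List.idxOf_cons_ne _ (fun h => hjy h.symm)]
      congr 1; push_cast; ring
    · rw [if_neg hjt]
      by_cases hjy : (j : Int) = y
      · have hyj : y.toNat = j := by omega
        rw [if_pos (by rw [hjy]; exact List.mem_cons_self)]
        rw [hjy, List.idxOf_cons_self]
        simp only [pySetItem]
        rw [if_pos hy.1, hyj, List.getElem?_set_self (by omega)]
        norm_num
      · rw [if_neg (by simp [hjy, hjt])]
        simp only [pySetItem]
        rw [if_pos hy.1, List.getElem?_set_ne (by omega)]

lemma countP_orB {α : Type} (p q : α → Bool) : ∀ (l : List α),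
    (∀ x ∈ l, ¬(p x = true ∧ q x = true)) →
    l.countP (fun x => p x || q x) = l.countP p + l.countP q := by
  intro l
  induction l with
  | nil => simp
  | cons x t ih =>
    intro h
    rw [List.countP_cons, List.countP_cons, List.countP_cons,
      ih (fun x hx => h x (List.mem_cons_of_mem _ hx))]
    have := h x List.mem_cons_self
    cases hp : p x <;> cases hq : q x <;> simp_all <;> omega

lemma countP_split (vals : List Int) (j : Nat) (hj : j < vals.length) :
    (PySem.List.pyRange 0 (vals.length : Int) 1).countP
        (fun k => lexlt (fun x => PySem.List.pyGetD vals x 0) k (j : Int))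
      = vals.countP (fun v => PySem.List.pyGetD vals (j : Int) 0 < v)
        + (List.take j vals).count (PySem.List.pyGetD vals (j : Int) 0) := by
  set vj := PySem.List.pyGetD vals (j : Int) 0 with hvj
  have hsplit : ∀ k : Int, lexlt (fun x => PySem.List.pyGetD vals x 0) k (j : Int)
      = ((vj < PySem.List.pyGetD vals k 0) ||
         ((PySem.List.pyGetD vals k 0 == vj) && decide (k < (j : Int)))) := by
    intro k; simp [lexlt, hvj]
  rw [List.countP_congr (fun k _ => by rw [hsplit k])]
  rw [countP_orB _ _ _ (by intro k _; simp; intro h1 h2; omega)]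
  congr 1
  · -- strictly greater part: count over all indices = count over vals
    conv_rhs => rw [← PySem.List.map_pyGetD_pyRange_zero (xs := vals) (d := 0)]
    rw [List.countP_map]
    rfl
  · -- equal-at-earlier-index part
    rw [PySem.List.pyRange_one_append 0 (j : Int) (vals.length : Int) (by positivity) (by exact_mod_cast hj.le),
      List.countP_append]
    have h2 : (PySem.List.pyRange (j : Int) (vals.length : Int) 1).countP
        (fun k => (PySem.List.pyGetD vals k 0 == vj) && decide (k < (j : Int))) = 0 := by
      rw [List.countP_eq_zero]
      intro k hk
      rw [PySem.List.mem_pyRange_one] at hk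
      simp; intro _; omega
    rw [h2, Nat.add_zero]
    rw [PySem.List.pyRange_zero_nat j, List.countP_map]
    have h4 : List.take j vals = (List.range j).map (fun k => vals.getD k 0) := by
      apply List.ext_getElem
      · simp; omega
      · intro i h1 h2
        simp only [List.getElem_take, List.getElem_map, List.getElem_range]
        rw [List.getD_eq_getElem _ _ (by simp at h1; omega)]
    rw [h4, List.count, List.countP_map]
    apply List.countP_congr
    intro k hk
    rw [List.mem_range] at hk
    simp [PySem.List.pyGetD_natCast]
    omega

lemma ranks_eq (vals : List Int) :
    PySem.List.slice (rankOutput (PySem.List.sorted (PySem.List.pyRange 0 (PySem.List.len vals) 1)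
      (fun x => PySem.List.pyGetD vals x 0) true)) none (some 10) = ranksAlt vals := by
  have hlen : PySem.List.len vals = (vals.length : Int) := rfl
  set N : Nat := vals.length with hN
  set key : Int → Int := fun x => PySem.List.pyGetD vals x 0 with hkey
  set ys := PySem.List.sorted (PySem.List.pyRange 0 (PySem.List.len vals) 1) key true with hys
  have hperm : ys.Perm (PySem.List.pyRange 0 (PySem.List.len vals) 1) :=
    PySem.List.sorted_perm _ _ _
  have hlys : ys.length = N := by
    rw [hperm.length_eq, hlen, PySem.List.length_pyRange_one]; omega
  have hnd : ys.Nodup := hperm.nodup_iff.mpr (PySem.List.nodup_pyRange_one _ _)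
  have hmem : ∀ x : Int, x ∈ ys ↔ (0 ≤ x ∧ x < (N : Int)) := fun x => by
    rw [hys, PySem.List.mem_sorted, hlen, PySem.List.mem_pyRange_one]
  have hpl : ys.Pairwise (fun a b => lexlt key a b = true) :=
    sorted_pyRange_pairwise_lex key (PySem.List.len vals)
  have hout0 : PySem.List.pyRepeat [(0 : Int)] (PySem.List.len ys) = List.replicate N (0 : Int) := by
    rw [PySem.List.pyRepeat_singleton]; congr 1
  have hOlen : (rankOutput ys).length = N := by
    unfold rankOutput; rw [scatter_length, hout0, List.length_replicate]
  have hOget : ∀ j : Nat, j < N →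
      (rankOutput ys)[j]? = some ((ys.idxOf ((j : Int)) : Int) + 1) := by
    intro j hj
    unfold rankOutput
    rw [hout0, scatter_get ys 0 _ hnd (fun x hx => by
      rw [hmem] at hx; simp only [List.length_replicate]; omega)]
    rw [if_pos ((hmem _).mpr ⟨by positivity, by exact_mod_cast hj⟩)]
    norm_num
  rw [PySem.List.slice_to _ (by norm_num : (0:Int) ≤ 10)]
  unfold ranksAlt
  have hmin : min 10 (PySem.List.len vals) = ((min 10 N : Nat) : Int) := by
    rw [hlen]; omega
  rw [hmin, PySem.List.pyRange_zero_nat]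
  apply List.ext_getElem
  · simp [hOlen]
  · intro j h1 h2
    have hjm : j < min 10 N := by simpa [hOlen] using h1
    have hjN : j < N := lt_of_lt_of_le hjm (min_le_right _ _)
    have hsome := hOget j hjN
    rw [List.getElem?_eq_getElem (by omega : j < (rankOutput ys).length)] at hsome
    rw [List.getElem_take, Option.some_inj.mp hsome]
    simp only [List.getElem_map, List.getElem_range]
    have hslice : PySem.List.slice vals none (some ((j : Int))) = List.take j vals := by
      rw [PySem.List.slice_to _ (by positivity : (0:Int) ≤ (j : Int))]
      congr 1
    rw [hslice]
    have hidx := idxOf_eq_countP_lexlt key ((j : Int)) ys hpl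
      ((hmem _).mpr ⟨by positivity, by exact_mod_cast hjN⟩)
    rw [hidx, hperm.countP_eq, hlen, hkey, countP_split vals j hjN]
    push_cast
    ring

lemma ranks_eq_final (ratings : List Int) : map1 ratings = map1_alt ratings := by
  unfold map1 map1_alt
  rw [PySem.List.foldl_prod_mk
    (f := fun acc i => acc ++ [PySem.List.pyGetD ratings (2*i) 0])
    (g := fun acc i => acc ++ [PySem.List.pyGetD ratings (2*i+1) 0])]
  simp only [PySem.List.foldl_append_singleton_eq_map, List.nil_append]
  exact Prod.ext (ranks_eq _) (ranks_eq _)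

-- ===== VERDICT =====
theorem map1_spec : Claim_equal_map1 := by
  intro ratings _
  unfold Spec_map1
  exact ranks_eq_final ratings
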